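-- pv_equiv track=rewrite | github.com/benluks/AI-Sudoku-Solver | src/sudoku.py | _computeCoordsFromGridIndex
-- ===== SOURCE A (Python) =====
-- def _computeCoordsFromGridIndex(gridIndex):
--     """
--     Given grid index, compute list of coordinates
--     which belong to said grid
--     """
--     #compute starting row and column for given grid
--     startRow = (gridIndex // 3) * 3
--     startColumn = (gridIndex % 3) * 3
--
--     #list of row and column coordinates
--     rows = range(startRow, startRow + 3)
--     columns = range(startColumn, startColumn + 3)
--
--
--     coordsInGrid = []
--
--     #populate list with coordinates
--     for row in rows:
--         for column in columns:
--             coordsInGrid.append((row, column))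
--
--     return coordsInGrid
-- ===== SOURCE B (Python) =====
-- def _computeCoordsFromGridIndex(gridIndex):
--     """Single flattened pass: i -> (startRow + i//3, startColumn + i%3)."""
--     startRow = (gridIndex // 3) * 3
--     startColumn = (gridIndex % 3) * 3
--     coordsInGrid = []
--     for i in range(9):
--         coordsInGrid.append((startRow + i // 3, startColumn + i % 3))
--     return coordsInGrid
-- ===== Notes on version B (the rewrite author's own statement) =====
-- stated objective: alternative
-- what changed: Replaces the two nested row/column loops with one flattened loop over range(9) computing each coordinate by divmod indexing (i//3, i%3).
import Mathlib
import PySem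

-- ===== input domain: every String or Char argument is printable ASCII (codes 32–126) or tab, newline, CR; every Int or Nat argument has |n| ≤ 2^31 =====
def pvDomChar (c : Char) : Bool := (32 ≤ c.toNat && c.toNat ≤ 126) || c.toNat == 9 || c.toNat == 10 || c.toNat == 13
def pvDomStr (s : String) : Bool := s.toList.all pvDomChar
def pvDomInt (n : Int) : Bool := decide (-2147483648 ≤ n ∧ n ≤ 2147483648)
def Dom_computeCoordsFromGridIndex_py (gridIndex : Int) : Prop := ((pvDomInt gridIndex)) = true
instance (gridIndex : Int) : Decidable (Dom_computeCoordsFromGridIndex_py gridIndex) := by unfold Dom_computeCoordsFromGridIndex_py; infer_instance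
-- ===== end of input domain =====

-- ===== PORT A =====
-- B: one flattened loop over range(9) with divmod indexing, instead of A's nested row/column loops (alternative decomposition).
def computeCoordsFromGridIndex_py (gridIndex : Int) : List (Int × Int) :=
  let startRow := (PySem.Int.floordiv gridIndex 3) * 3
  let startColumn := (PySem.Int.mod gridIndex 3) * 3
  let rows := PySem.List.pyRange startRow (startRow + 3) 1
  let columns := PySem.List.pyRange startColumn (startColumn + 3) 1
  rows.foldl (fun acc row =>
    columns.foldl (fun acc column => acc ++ [(row, column)]) acc) []

-- ===== PORT B =====
def computeCoordsFromGridIndex_py_alt (gridIndex : Int) : List (Int × Int) :=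
  let startRow := (PySem.Int.floordiv gridIndex 3) * 3
  let startColumn := (PySem.Int.mod gridIndex 3) * 3
  (PySem.List.pyRange 0 9 1).foldl (fun acc i =>
    acc ++ [(startRow + PySem.Int.floordiv i 3, startColumn + PySem.Int.mod i 3)]) []

-- ===== PRECONDITION & SPEC =====
def Spec_computeCoordsFromGridIndex_py (gridIndex : Int) (out : List (Int × Int)) : Prop := out = computeCoordsFromGridIndex_py_alt gridIndex
instance (gridIndex : Int) (out : List (Int × Int)) : Decidable (Spec_computeCoordsFromGridIndex_py gridIndex out) := by unfold Spec_computeCoordsFromGridIndex_py; infer_instance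

-- ===== CLAIM (what is proved, stated in full; the proofs are below) =====
def Claim_equal_computeCoordsFromGridIndex_py : Prop := ∀ (gridIndex : Int), Dom_computeCoordsFromGridIndex_py gridIndex → Spec_computeCoordsFromGridIndex_py gridIndex (computeCoordsFromGridIndex_py gridIndex)

-- ===== LEMMAS AND PROOFS =====

-- ===== VERDICT (by name: the statement is the Claim_ definition above) =====
theorem pyRange3 (a : Int) : PySem.List.pyRange a (a + 3) 1 = [a, a + 1, a + 2] := by
  rw [PySem.List.pyRange_one_cons (by omega), PySem.List.pyRange_one_cons (by omega),
      PySem.List.pyRange_one_cons (by omega), PySem.List.pyRange_one_eq_nil (by omega)]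
  norm_num
  omega

theorem pyRange09 : PySem.List.pyRange 0 9 1 = [0, 1, 2, 3, 4, 5, 6, 7, 8] := by decide

theorem computeCoordsFromGridIndex_py_spec : Claim_equal_computeCoordsFromGridIndex_py := by
  intro g _
  unfold Spec_computeCoordsFromGridIndex_py
  unfold computeCoordsFromGridIndex_py computeCoordsFromGridIndex_py_alt
  simp only [pyRange3, pyRange09, List.foldl_cons, List.foldl_nil, PySem.Int.floordiv,
    PySem.Int.mod]
  norm_num [Int.fdiv, Int.fmod]
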